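-- pv_equiv track=rewrite | github.com/ltebs-polimi/AY2122_II_Project-1 | GUI/port_selection_and_connection.py | findPsoC
-- ===== SOURCE A (Python) =====
-- def findPsoC(portsFound):
--     commPort = 'None'
--     n_connections = len(portsFound)
--
--     for i in range(0,n_connections):
--         port = portsFound[i]
--         strPort = str(port)
--
--         if 'Intel' in strPort: # poi sostituire con Cypress!
--             splitPort = strPort.split(' ')
--             commPort = (splitPort[0])
--
--     return commPort
-- ===== SOURCE B (Python) =====
-- def findPsoC(portsFound):
--     for port in reversed(portsFound):
--         strPort = str(port)
--         if 'Intel' in strPort: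
--             return strPort.split(' ')[0]
--     return 'None'
-- ===== Notes on version B (the rewrite author's own statement) =====
-- stated objective: alternative
-- what changed: Replaces the keep-last accumulator over an index loop with a reversed-order scan that returns the first match early and stops, instead of always traversing the whole list.
import Mathlib
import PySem

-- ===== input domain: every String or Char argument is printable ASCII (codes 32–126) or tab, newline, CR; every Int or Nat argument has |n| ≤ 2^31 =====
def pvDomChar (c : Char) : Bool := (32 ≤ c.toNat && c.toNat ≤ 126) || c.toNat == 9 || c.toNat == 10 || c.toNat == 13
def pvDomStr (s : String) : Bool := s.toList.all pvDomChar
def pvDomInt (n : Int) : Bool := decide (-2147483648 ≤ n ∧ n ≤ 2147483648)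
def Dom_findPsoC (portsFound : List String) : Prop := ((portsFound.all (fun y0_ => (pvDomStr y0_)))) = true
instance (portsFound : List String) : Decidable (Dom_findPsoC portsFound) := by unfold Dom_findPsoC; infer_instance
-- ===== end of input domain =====

-- B iterates in reverse with an early return on the first 'Intel' match instead of A's
-- keep-last accumulator over the whole list; same return value everywhere (alternative decomposition).

-- strPort.split(' ')[0]: split with a non-empty separator always yields a non-empty list,
-- so Python's [0] never raises; ported as headD "" of the split (exact on every input).
def psocFirstWord (s : String) : String :=
  ((PySem.Str.split? s " ").getD []).headD ""

-- ===== PORT A =====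
def findPsoC (portsFound : List String) : String :=
  portsFound.foldl
    (fun commPort strPort =>
      if PySem.Str.isIn "Intel" strPort then psocFirstWord strPort else commPort)
    "None"

-- ===== PORT B =====
def psocGo : List String → String
  | [] => "None"
  | strPort :: rest =>
      if PySem.Str.isIn "Intel" strPort then psocFirstWord strPort else psocGo rest

def findPsoC_alt (portsFound : List String) : String := psocGo portsFound.reverse

-- ===== PRECONDITION & SPEC =====
def Spec_findPsoC (portsFound : List String) (out : String) : Prop := out = findPsoC_alt portsFound
instance (portsFound : List String) (out : String) : Decidable (Spec_findPsoC portsFound out) := by unfold Spec_findPsoC; infer_instance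

-- ===== CLAIM (what is proved, stated in full; the proofs are below) =====
def Claim_equal_findPsoC : Prop := ∀ (portsFound : List String), Dom_findPsoC portsFound → Spec_findPsoC portsFound (findPsoC portsFound)

-- ===== LEMMAS AND PROOFS =====
theorem psoc_foldl_eq_go_reverse (xs : List String) :
    findPsoC xs = psocGo xs.reverse := by
  induction xs using List.reverseRecOn with
  | nil => rfl
  | append_singleton ys s ih =>
      simp only [findPsoC, List.foldl_append, List.foldl_cons, List.foldl_nil,
        List.reverse_append, List.reverse_singleton, List.singleton_append, psocGo]
      split_ifs with h
      · rfl
      · exact ih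

-- ===== VERDICT (by name: the statement is the Claim_ definition above) =====
theorem findPsoC_spec : Claim_equal_findPsoC := by
  intro portsFound _
  unfold Spec_findPsoC findPsoC_alt
  exact psoc_foldl_eq_go_reverse portsFound
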